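-- pv_equiv track=rewrite | github.com/cazador-code/obieo | scripts/prepare_sms_contacts.py | build_row_groups
-- ===== SOURCE A (Python) =====
-- def build_zip_file_stem(file_stem: str, zip_code: str) -> str:
--     safe_zip = (zip_code or "unknown_zip").strip() or "unknown_zip"
--     return f"{file_stem}_zip-{safe_zip}"
--
-- def build_row_groups(
--     file_stem: str,
--     prepared_rows: list[dict[str, str]],
--     group_by_zip: bool,
-- ) -> list[tuple[str, list[dict[str, str]]]]:
--     if not group_by_zip:
--         return [(file_stem, prepared_rows)]
--
--     grouped_rows: dict[str, list[dict[str, str]]] = {}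
--     for row in prepared_rows:
--         grouped_rows.setdefault(row["zip"], []).append(row)
--
--     return [
--         (build_zip_file_stem(file_stem, zip_code), grouped_rows[zip_code])
--         for zip_code in sorted(grouped_rows)
--     ]
-- ===== SOURCE B (Python) =====
-- def build_zip_file_stem(file_stem: str, zip_code: str) -> str:
--     safe_zip = (zip_code or "unknown_zip").strip() or "unknown_zip"
--     return f"{file_stem}_zip-{safe_zip}"
--
-- def build_row_groups(
--     file_stem: str,
--     prepared_rows: list,
--     group_by_zip: bool,
-- ):
--     if not group_by_zip:
--         return [(file_stem, prepared_rows)]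
--
--     ordered = sorted(prepared_rows, key=lambda row: row["zip"])
--     result = []
--     i = 0
--     n = len(ordered)
--     while i < n:
--         zip_code = ordered[i]["zip"]
--         j = i + 1
--         while j < n and ordered[j]["zip"] == zip_code:
--             j += 1
--         result.append((build_zip_file_stem(file_stem, zip_code), ordered[i:j]))
--         i = j
--     return result
-- ===== Notes on version B (the rewrite author's own statement) =====
-- stated objective: alternative
-- what changed: Replaces A's dict-of-lists scatter pass followed by sorting the keys with a stable sort of the rows by zip followed by one linear sweep that emits consecutive runs as groups.
import Mathlib
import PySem

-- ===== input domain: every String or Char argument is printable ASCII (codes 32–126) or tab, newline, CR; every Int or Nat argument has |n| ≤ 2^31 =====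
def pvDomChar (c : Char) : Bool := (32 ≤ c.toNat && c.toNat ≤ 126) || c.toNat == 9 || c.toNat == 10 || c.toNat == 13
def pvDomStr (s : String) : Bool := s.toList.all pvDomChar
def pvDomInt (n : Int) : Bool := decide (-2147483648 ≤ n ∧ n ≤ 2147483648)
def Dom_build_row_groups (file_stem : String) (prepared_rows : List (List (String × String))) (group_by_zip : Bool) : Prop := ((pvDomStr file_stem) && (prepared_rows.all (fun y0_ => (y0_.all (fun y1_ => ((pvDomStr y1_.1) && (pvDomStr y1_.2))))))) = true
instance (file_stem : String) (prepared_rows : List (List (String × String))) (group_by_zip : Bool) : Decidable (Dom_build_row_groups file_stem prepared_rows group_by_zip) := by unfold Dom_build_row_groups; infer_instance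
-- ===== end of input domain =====

-- B replaces A's hash-table scatter followed by a sort of the keys with a stable sort of the
-- rows by zip followed by one linear sweep collecting consecutive runs (objective: alternative).

-- ===== PORT A =====
-- module helper build_zip_file_stem (used verbatim by both Pythons, so shared by both ports)
def build_zip_file_stem (file_stem : String) (zip_code : String) : String :=
  let base := if zip_code = "" then "unknown_zip" else zip_code   -- (zip_code or "unknown_zip")
  let stripped := PySem.Str.strip base
  let safe_zip := if stripped = "" then "unknown_zip" else stripped
  file_stem ++ "_zip-" ++ safe_zip

-- row["zip"]: first-match lookup; where Python raises KeyError (no "zip" key) the port uses ""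
-- — those inputs are excluded by Pre_build_row_groups.
def pvRowZip (row : List (String × String)) : String := (List.lookup "zip" row).getD ""

def build_row_groups (file_stem : String) (prepared_rows : List (List (String × String))) (group_by_zip : Bool) : List (String × (List (List (String × String)))) :=
  if group_by_zip = false then [(file_stem, prepared_rows)]
  else
    -- grouped_rows.setdefault(row["zip"], []).append(row)  ==  modify with default []
    let grouped : PySem.Dict String (List (List (String × String))) :=
      prepared_rows.foldl (fun d row => d.modify (pvRowZip row) [] (fun g => g ++ [row])) PySem.Dict.empty
    (PySem.List.sorted grouped.keys (fun k => k)).map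
      (fun zip_code => (build_zip_file_stem file_stem zip_code, grouped.getD zip_code []))

-- ===== PORT B =====
-- the while-loop of Source B: peel off the run of rows sharing the leading zip, recurse on the rest
def pvGroupRuns (ys : List (List (String × String))) : List (String × (List (List (String × String)))) :=
  match ys with
  | [] => []
  | r :: rest =>
    let z := pvRowZip r
    (z, r :: rest.takeWhile (fun r' => pvRowZip r' == z)) ::
      pvGroupRuns (rest.dropWhile (fun r' => pvRowZip r' == z))
termination_by ys.length
decreasing_by simpa using Nat.lt_succ_of_le (List.length_dropWhile_le _ rest)

def build_row_groups_alt (file_stem : String) (prepared_rows : List (List (String × String))) (group_by_zip : Bool) : List (String × (List (List (String × String)))) :=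
  if group_by_zip = false then [(file_stem, prepared_rows)]
  else
    let ordered := PySem.List.sorted prepared_rows pvRowZip
    (pvGroupRuns ordered).map (fun p => (build_zip_file_stem file_stem p.1, p.2))

-- ===== PRECONDITION & SPEC =====
-- Pre_ excludes exactly the inputs on which Python A raises KeyError: grouping requested and
-- some row has no "zip" key (B's Python raises there too).
def Pre_build_row_groups (file_stem : String) (prepared_rows : List (List (String × String))) (group_by_zip : Bool) : Prop :=
  group_by_zip = true → ∀ row ∈ prepared_rows, (List.lookup "zip" row).isSome = true
instance (file_stem : String) (prepared_rows : List (List (String × String))) (group_by_zip : Bool) : Decidable (Pre_build_row_groups file_stem prepared_rows group_by_zip) := by unfold Pre_build_row_groups; infer_instance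

def pvWitness_build_row_groups : String × (List (List (String × String))) × Bool :=
  ("contacts", [[("zip", "10002"), ("name", "b")], [("zip", "10001")], [("zip", "10002"), ("name", "a")]], true)

def Spec_build_row_groups (file_stem : String) (prepared_rows : List (List (String × String))) (group_by_zip : Bool) (out : List (String × (List (List (String × String))))) : Prop := out = build_row_groups_alt file_stem prepared_rows group_by_zip
instance (file_stem : String) (prepared_rows : List (List (String × String))) (group_by_zip : Bool) (out : List (String × (List (List (String × String))))) : Decidable (Spec_build_row_groups file_stem prepared_rows group_by_zip out) := by unfold Spec_build_row_groups; infer_instance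

-- ===== CLAIM (what is proved, stated in full; the proofs are below) =====
def Claim_equal_build_row_groups : Prop := ∀ (file_stem : String) (prepared_rows : List (List (String × String))) (group_by_zip : Bool), Dom_build_row_groups file_stem prepared_rows group_by_zip → Pre_build_row_groups file_stem prepared_rows group_by_zip → Spec_build_row_groups file_stem prepared_rows group_by_zip (build_row_groups file_stem prepared_rows group_by_zip)

-- ===== LEMMAS AND PROOFS =====

-- sorted-insertion preserves key-sortedness
lemma pvPairwise_insertBy (x : List (String × String)) (ys : List (List (String × String)))
    (h : ys.Pairwise (fun a b => pvRowZip a ≤ pvRowZip b)) :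
    (PySem.List.insertBy (fun a b => decide (pvRowZip a < pvRowZip b)) x ys).Pairwise
      (fun a b => pvRowZip a ≤ pvRowZip b) := by
  induction ys with
  | nil => simp [PySem.List.insertBy]
  | cons y ys ih =>
    rw [PySem.List.insertBy]
    by_cases hlt : pvRowZip x < pvRowZip y
    · simp only [hlt, decide_true, if_true]
      refine List.Pairwise.cons ?_ h
      intro z hz
      rcases List.mem_cons.mp hz with rfl | hz
      · exact le_of_lt hlt
      · exact le_trans (le_of_lt hlt) (List.rel_of_pairwise_cons h hz)
    · simp only [hlt, decide_false]
      refine List.Pairwise.cons ?_ (ih h.tail)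
      intro z hz
      rcases (PySem.List.mem_insertBy _ x z ys).mp hz with rfl | hz
      · exact le_of_not_gt hlt
      · exact List.rel_of_pairwise_cons h hz

-- inserting into a key-sorted list puts x AFTER all elements of equal key (stability)
lemma pvFilter_insertBy (k : String) (x : List (String × String)) (ys : List (List (String × String)))
    (h : ys.Pairwise (fun a b => pvRowZip a ≤ pvRowZip b)) :
    (PySem.List.insertBy (fun a b => decide (pvRowZip a < pvRowZip b)) x ys).filter
        (fun r => pvRowZip r == k)
      = ys.filter (fun r => pvRowZip r == k) ++ (if pvRowZip x == k then [x] else []) := by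
  induction ys with
  | nil => simp [PySem.List.insertBy, List.filter_cons]
  | cons y ys ih =>
    rw [PySem.List.insertBy]
    by_cases hlt : pvRowZip x < pvRowZip y
    · simp only [hlt, decide_true, if_true]
      by_cases hx : pvRowZip x == k
      · -- every element of y :: ys has key > pvRowZip x = k, so its filter is empty
        have hk : pvRowZip x = k := by simpa using hx
        rw [hk] at hlt
        have hnil : (y :: ys).filter (fun r => pvRowZip r == k) = [] := by
          rw [List.filter_eq_nil_iff]
          intro a ha
          have hka : k < pvRowZip a := by
            rcases List.mem_cons.mp ha with rfl | ha'
            · exact hlt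
            · exact lt_of_lt_of_le hlt (List.rel_of_pairwise_cons h ha')
          simp only [beq_iff_eq]
          exact fun hc => absurd (hc ▸ hka) (lt_irrefl k)
        simp [hx, hnil]
      · simp [List.filter_cons, hx]
    · simp only [hlt, decide_false, Bool.false_eq_true, if_false]
      rw [List.filter_cons, List.filter_cons, ih h.tail]
      by_cases hy : pvRowZip y == k <;> simp [hy]

-- stability of the whole insertion sort, as a fold invariant
lemma pvFilter_foldl_insertBy (k : String) (xs : List (List (String × String))) :
    ∀ acc, acc.Pairwise (fun a b => pvRowZip a ≤ pvRowZip b) →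
    (xs.foldl (fun acc x => PySem.List.insertBy (fun a b => decide (pvRowZip a < pvRowZip b)) x acc) acc).filter
        (fun r => pvRowZip r == k)
      = acc.filter (fun r => pvRowZip r == k) ++ xs.filter (fun r => pvRowZip r == k) := by
  induction xs with
  | nil => intro acc _; simp
  | cons x xs ih =>
    intro acc hacc
    rw [List.foldl_cons, ih _ (pvPairwise_insertBy x acc hacc), pvFilter_insertBy k x acc hacc,
      List.filter_cons]
    by_cases hx : pvRowZip x == k <;> simp [hx]

-- sorted(rows, key=zip) keeps the relative order inside each zip class
lemma pvSorted_filter (rows : List (List (String × String))) (k : String) :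
    (PySem.List.sorted rows pvRowZip).filter (fun r => pvRowZip r == k)
      = rows.filter (fun r => pvRowZip r == k) := by
  rw [PySem.List.sorted_eq_foldl_insertBy, pvFilter_foldl_insertBy k rows [] (by simp)]
  simp

-- characterisation of pvGroupRuns on a key-sorted list
lemma pvGroupRuns_spec : ∀ (ys : List (List (String × String))),
    ys.Pairwise (fun a b => pvRowZip a ≤ pvRowZip b) →
    ((pvGroupRuns ys).map Prod.fst).Pairwise (· < ·)
    ∧ (∀ k, k ∈ (pvGroupRuns ys).map Prod.fst ↔ k ∈ ys.map pvRowZip)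
    ∧ pvGroupRuns ys = ((pvGroupRuns ys).map Prod.fst).map
        (fun k => (k, ys.filter (fun r => pvRowZip r == k))) := by
  intro ys
  induction ys using pvGroupRuns.induct with
  | case1 => intro _; simp [pvGroupRuns]
  | case2 r rest zz ih =>
    intro h
    set z := pvRowZip r with hz
    set q : List (String × String) → Bool := fun r' => pvRowZip r' == z with hq
    have hTD : rest.takeWhile q ++ rest.dropWhile q = rest := List.takeWhile_append_dropWhile
    have hT : ∀ e ∈ rest.takeWhile q, pvRowZip e = z := by
      intro e he
      have := List.mem_takeWhile_imp he
      simpa [hq] using this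
    have hD : ∀ e ∈ rest.dropWhile q, z < pvRowZip e := by
      intro e he
      rcases hcons : rest.dropWhile q with _ | ⟨d, D'⟩
      · rw [hcons] at he; cases he
      · have hne : rest.dropWhile q ≠ [] := by simp [hcons]
        have hqd : q ((rest.dropWhile q).head hne) = false := List.head_dropWhile_not q hne
        have hhead : (rest.dropWhile q).head hne = d := by simp [hcons]
        rw [hhead] at hqd
        have hdz : pvRowZip d ≠ z := by simpa [hq] using hqd
        have hzd : z ≤ pvRowZip d := by
          have hdmem : d ∈ rest := (List.dropWhile_sublist q).mem (by simp [hcons])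
          exact List.rel_of_pairwise_cons h hdmem
        have hzd' : z < pvRowZip d := lt_of_le_of_ne hzd (Ne.symm hdz)
        rw [hcons] at he
        rcases List.mem_cons.mp he with rfl | he'
        · exact hzd'
        · have hPD : (rest.dropWhile q).Pairwise (fun a b => pvRowZip a ≤ pvRowZip b) :=
            h.tail.sublist (List.dropWhile_sublist q)
          rw [hcons] at hPD
          exact lt_of_lt_of_le hzd' (List.rel_of_pairwise_cons hPD he')
    have hPD : (rest.dropWhile q).Pairwise (fun a b => pvRowZip a ≤ pvRowZip b) :=
      h.tail.sublist (List.dropWhile_sublist q)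
    obtain ⟨ih1, ih2, ih3⟩ := ih hPD
    have hGR : pvGroupRuns (r :: rest)
        = (z, r :: rest.takeWhile q) :: pvGroupRuns (rest.dropWhile q) := by
      rw [pvGroupRuns]
    have hkD : ∀ k ∈ (pvGroupRuns (rest.dropWhile q)).map Prod.fst, z < k := by
      intro k hk
      rcases List.mem_map.mp ((ih2 k).mp hk) with ⟨e, he, rfl⟩
      exact hD e he
    refine ⟨?_, ?_, ?_⟩
    · rw [hGR]
      simp only [List.map_cons]
      exact List.Pairwise.cons hkD ih1
    · intro k
      rw [hGR]
      simp only [List.map_cons, List.mem_cons, ih2]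
      constructor
      · rintro (rfl | hk)
        · exact Or.inl rfl
        · rcases List.mem_map.mp hk with ⟨e, he, rfl⟩
          exact Or.inr (List.mem_map.mpr ⟨e, (List.dropWhile_sublist q).mem he, rfl⟩)
      · rintro (rfl | hk)
        · exact Or.inl rfl
        · rcases List.mem_map.mp hk with ⟨e, he, rfl⟩
          rw [← hTD] at he
          rcases List.mem_append.mp he with he' | he'
          · exact Or.inl (hT e he')
          · exact Or.inr (List.mem_map.mpr ⟨e, he', rfl⟩)
    · rw [hGR]
      simp only [List.map_cons]
      congr 1
      · -- the first run is exactly the filter by z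
        have h1 : (r :: rest).filter (fun r' => pvRowZip r' == z)
            = r :: rest.takeWhile q := by
          rw [List.filter_cons]
          simp only [← hz, beq_self_eq_true, if_true]
          congr 1
          rw [← hTD, List.filter_append]
          have hTf : (rest.takeWhile q).filter (fun r' => pvRowZip r' == z) = rest.takeWhile q :=
            List.filter_eq_self.mpr (fun e he => by simp [hT e he])
          have hDf : (rest.dropWhile q).filter (fun r' => pvRowZip r' == z) = [] :=
            List.filter_eq_nil_iff.mpr (fun e he => by simp [ne_of_gt (hD e he)])
          rw [hTf, hDf, List.append_nil, hTD]
        rw [h1]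
      · conv_lhs => rw [ih3]
        apply List.map_congr_left
        intro k hk
        have hzk : z < k := hkD k hk
        congr 1
        rw [List.filter_cons]
        simp only [← hz, beq_iff_eq]
        rw [if_neg (by exact fun hc => absurd (hc ▸ hzk) (lt_irrefl _))]
        have hTf : (rest.takeWhile q).filter (fun r' => pvRowZip r' == k) = [] :=
          List.filter_eq_nil_iff.mpr (fun e he => by
            simp only [beq_iff_eq]
            rw [hT e he]
            exact fun hc => absurd (hc ▸ hzk) (lt_irrefl _))
        conv_rhs => rw [← hTD]
        rw [List.filter_append, hTf, List.nil_append]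

-- ===== VERDICT (by name: the statement is the Claim_ definition above) =====
theorem build_row_groups_spec : Claim_equal_build_row_groups := by
  unfold Claim_equal_build_row_groups
  intro file_stem rows g _ _
  unfold Spec_build_row_groups
  cases g with
  | false => simp [build_row_groups, build_row_groups_alt]
  | true =>
    simp only [build_row_groups, build_row_groups_alt, Bool.true_eq_false, if_false]
    -- A's dict group contents are the zip-class filters, in original order
    have hgetD : ∀ k : String,
        (rows.foldl (fun d row => d.modify (pvRowZip row) [] (fun g => g ++ [row]))
          PySem.Dict.empty).getD k []
        = rows.filter (fun r => pvRowZip r == k) := by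
      intro k
      have hfold : rows.foldl (fun d row => d.modify (pvRowZip row) [] (fun g => g ++ [row]))
            PySem.Dict.empty
          = (rows.map (fun r => (pvRowZip r, r))).foldl
              (fun d p => d.modify p.1 [] (fun g => g ++ [p.2])) PySem.Dict.empty := by
        rw [List.foldl_map]
      rw [hfold, PySem.Dict.getD_foldl_modify_append]
      simp [List.filter_map, Function.comp_def, List.map_map]
    -- A's dict keys are the distinct zips in first-occurrence order
    have hkeys : (rows.foldl (fun d row => d.modify (pvRowZip row) [] (fun g => g ++ [row]))
          PySem.Dict.empty).keys
        = PySem.Set.ofList (rows.map pvRowZip) := by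
      rw [PySem.Dict.keys_foldl_modify_key rows pvRowZip []
        (fun _ x => fun g => g ++ [x]) PySem.Dict.empty,
        PySem.Dict.keys_empty, PySem.Set.update_nil_left]
    obtain ⟨h1, h2, h3⟩ := pvGroupRuns_spec _ (PySem.List.sorted_pairwise rows pvRowZip)
    -- sorted(dict keys) = the keys of the runs of the sorted row list
    have hsk : PySem.List.sorted (PySem.Set.ofList (rows.map pvRowZip)) (fun k => k)
        = (pvGroupRuns (PySem.List.sorted rows pvRowZip)).map Prod.fst := by
      apply PySem.List.sorted_eq_of_perm_of_pairwise_lt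
      · rw [List.perm_ext_iff_of_nodup (h1.imp ne_of_lt) (PySem.Set.nodup_ofList _)]
        intro k
        rw [h2, PySem.Set.mem_ofList,
          ((PySem.List.sorted_perm rows pvRowZip false).map pvRowZip).mem_iff]
      · exact h1
    rw [hkeys, hsk]
    conv_rhs => rw [h3]
    simp only [List.map_map]
    apply List.map_congr_left
    intro p _
    simp only [Function.comp_def]
    rw [hgetD, pvSorted_filter]
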